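-- pv_equiv track=rewrite | github.com/ksp90/PythonWorks | TestWork/String.py | GetCommonString
-- ===== SOURCE A (Python) =====
-- def GetCommonString(s1,s2):
--     len1 = len(s1)
--     len2 = len(s2)
--     short_len=0
--     res=[]
--     if len1<len2:
--         short_len=len1
--     else:
--         short_len=len2
--     for i in range(1,short_len +1):
--         subString1 = s1[:i]
--         subString2 = s2[-i:]
--         if subString1 == subString2:
--             res.append(subString1)
--         subString1 = s2[:i]
--         subString2 = s1[-i:]
--         if subString1 == subString2:
--             res.append(subString1)
--     return res
-- ===== SOURCE B (Python) =====
-- def GetCommonString(s1, s2):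
--     # KMP prefix-function on p + '\x00' + s gives every overlap length i with
--     # p[:i] == s[-i:]; the two directions are merged by length (s1-prefix first on ties).
--     def overlaps(p, s):
--         w = p + "\x00" + s
--         n = len(w)
--         pi = [0] * n
--         k = 0
--         for q in range(1, n):
--             while k > 0 and w[q] != w[k]:
--                 k = pi[k - 1]
--             if w[q] == w[k]:
--                 k += 1
--             pi[q] = k
--         res = []
--         j = pi[n - 1]
--         while j > 0:
--             res.append(j)
--             j = pi[j - 1]
--         res.reverse()
--         return res
--     L1 = overlaps(s1, s2)   # lengths i with s1[:i] == s2[-i:], ascending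
--     L2 = overlaps(s2, s1)   # lengths i with s2[:i] == s1[-i:], ascending
--     out = []
--     a = b = 0
--     while a < len(L1) and b < len(L2):
--         if L1[a] <= L2[b]:
--             out.append(s1[:L1[a]])
--             a += 1
--         else:
--             out.append(s2[:L2[b]])
--             b += 1
--     out += [s1[:i] for i in L1[a:]]
--     out += [s2[:i] for i in L2[b:]]
--     return out
-- ===== Notes on version B (the rewrite author's own statement) =====
-- stated objective: alternative
-- what changed: A tests every overlap length i by building and comparing four fresh slices per i; B instead computes all prefix/suffix overlap lengths with the KMP prefix-function border chain of p + '\x00' + s for each direction and merges the two ascending length lists, reconstructing A's interleaved order (the scan work drops from quadratic to linear, though on overlap-heavy inputs both are dominated by materialising the output slices).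
import Mathlib
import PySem

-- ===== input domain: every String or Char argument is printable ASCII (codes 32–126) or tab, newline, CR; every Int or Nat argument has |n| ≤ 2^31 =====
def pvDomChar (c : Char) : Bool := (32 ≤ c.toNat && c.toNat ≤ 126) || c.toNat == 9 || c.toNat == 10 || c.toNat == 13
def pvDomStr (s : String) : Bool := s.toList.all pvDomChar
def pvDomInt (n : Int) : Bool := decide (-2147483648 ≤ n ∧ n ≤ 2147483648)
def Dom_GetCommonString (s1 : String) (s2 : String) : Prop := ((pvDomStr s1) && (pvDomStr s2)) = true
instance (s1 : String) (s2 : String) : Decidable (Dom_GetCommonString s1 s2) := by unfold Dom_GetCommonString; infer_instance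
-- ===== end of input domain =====

-- B replaces A's per-length slice-and-compare loop by the KMP prefix-function on
-- p ++ '\x00' ++ s (its border chain lists all prefix/suffix overlap lengths), the two
-- directions then merged by length (s1-prefix first on ties).

-- ===== PORT A =====
def GetCommonString (s1 : String) (s2 : String) : List String :=
  let len1 := PySem.Str.len s1
  let len2 := PySem.Str.len s2
  let short_len := if len1 < len2 then len1 else len2
  (PySem.List.pyRange 1 (short_len + 1)).foldl (fun res i =>
    let subString1 := PySem.Str.slice s1 none (some i)
    let subString2 := PySem.Str.slice s2 (some (-i)) none
    let res := if subString1 == subString2 then res ++ [subString1] else res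
    let subString1 := PySem.Str.slice s2 none (some i)
    let subString2 := PySem.Str.slice s1 (some (-i)) none
    if subString1 == subString2 then res ++ [subString1] else res) []

-- ===== PORT B =====
-- fidelity notes: the `fuel` arguments only make Python's while-loops total
-- (fuel = k suffices because pi[k-1] < k); Python preallocates pi = [0]*n and writes
-- pi[q] in index order, which the growing list reproduces entry for entry.
def pvKmpInner (w : List Char) (pi : List Nat) (c : Char) : Nat → Nat → Nat
  | 0, k => k
  | fuel+1, k =>
    if 0 < k ∧ ¬ (c = w.getD k ' ') then pvKmpInner w pi c fuel (pi.getD (k-1) 0)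
    else k

def pvKmpPis (w : List Char) : List Nat × Nat :=
  (List.range (w.length - 1)).foldl (fun st t =>
    let q := t + 1
    let c := w.getD q ' '
    let k := pvKmpInner w st.1 c st.2 st.2
    let k := if c = w.getD k ' ' then k + 1 else k
    (st.1 ++ [k], k)) ([0], 0)

def pvChain (pi : List Nat) : Nat → Nat → List Nat
  | 0, _ => []
  | fuel+1, j => if 0 < j then j :: pvChain pi fuel (pi.getD (j-1) 0) else []

def pvOverlaps (p s : List Char) : List Nat :=
  let w := p ++ '\x00' :: s
  let pis := pvKmpPis w
  (pvChain pis.1 w.length (pis.1.getD (w.length - 1) 0)).reverse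

def pvMerge (s1 s2 : String) : List Nat → List Nat → List String
  | [], l2 => l2.map (fun j => PySem.Str.slice s2 none (some (j : Int)))
  | i :: l1, [] => (i :: l1).map (fun i => PySem.Str.slice s1 none (some (i : Int)))
  | i :: l1, j :: l2 =>
    if i ≤ j then PySem.Str.slice s1 none (some (i : Int)) :: pvMerge s1 s2 l1 (j :: l2)
    else PySem.Str.slice s2 none (some (j : Int)) :: pvMerge s1 s2 (i :: l1) l2
termination_by l1 l2 => l1.length + l2.length

def GetCommonString_alt (s1 : String) (s2 : String) : List String :=
  let L1 := pvOverlaps s1.toList s2.toList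
  let L2 := pvOverlaps s2.toList s1.toList
  pvMerge s1 s2 L1 L2

-- ===== PRECONDITION & SPEC =====
def Spec_GetCommonString (s1 : String) (s2 : String) (out : List String) : Prop := out = GetCommonString_alt s1 s2
instance (s1 : String) (s2 : String) (out : List String) : Decidable (Spec_GetCommonString s1 s2 out) := by unfold Spec_GetCommonString; infer_instance

-- ===== CLAIM (what is proved, stated in full; the proofs are below) =====
def Claim_equal_GetCommonString : Prop := ∀ (s1 : String) (s2 : String), Dom_GetCommonString s1 s2 → Spec_GetCommonString s1 s2 (GetCommonString s1 s2)

-- ===== LEMMAS AND PROOFS =====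

def Bord (u : List Char) (j : Nat) : Prop := j ≤ u.length ∧ u.take j = u.drop (u.length - j)
-- largest proper border length of u (the predicate is decidable via DecidableEq (List Char))
def maxb (u : List Char) : Nat :=
  Nat.findGreatest (fun j => u.take j = u.drop (u.length - j)) (u.length - 1)

theorem bord_zero (u : List Char) : Bord u 0 := ⟨Nat.zero_le _, by simp⟩

theorem bord_nest {u : List Char} {i j : Nat} (hij : j ≤ i)
    (hi : Bord u i) (hj : Bord u j) : Bord (u.take i) j := by
  obtain ⟨hi1, hi2⟩ := hi
  obtain ⟨hj1, hj2⟩ := hj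
  have hl : (u.take i).length = i := by simp; omega
  constructor
  · omega
  · rw [hl, List.take_take, min_eq_left hij, hi2, List.drop_drop, hj2]
    congr 1
    omega

theorem bord_trans {u : List Char} {i j : Nat} (hi : Bord u i)
    (hj : Bord (u.take i) j) : Bord u j := by
  obtain ⟨hi1, hi2⟩ := hi
  obtain ⟨hj1, hj2⟩ := hj
  rw [List.length_take, min_eq_left hi1] at hj1 hj2
  constructor
  · omega
  · rw [List.take_take, min_eq_left hj1] at hj2
    rw [hj2, hi2, List.drop_drop]
    congr 1
    omega

theorem bord_ext {u : List Char} {c : Char} {j : Nat} (hj : j ≤ u.length) :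
    Bord (u ++ [c]) (j + 1) ↔ Bord u j ∧ u.getD j c = c := by
  rcases eq_or_lt_of_le hj with h | h
  · subst h
    simp [Bord, List.getD]
  · have h1 : (u ++ [c]).take (j+1) = u.take j ++ [u.getD j c] := by
      rw [List.take_append_of_le_length (by omega), List.take_succ]
      simp [List.getD, List.getElem?_eq_getElem h]
    have h2 : (u ++ [c]).length - (j+1) = u.length - j := by simp
    have h3 : (u ++ [c]).drop (u.length - j) = u.drop (u.length - j) ++ [c] := by
      rw [List.drop_append_of_le_length (by omega)]
    constructor
    · rintro ⟨_, he⟩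
      rw [h2, h1, h3] at he
      have := List.append_inj he (by simp [List.length_take, List.length_drop]; omega)
      refine ⟨⟨le_of_lt h, this.1⟩, by simpa using this.2⟩
    · rintro ⟨⟨_, hb⟩, hc⟩
      refine ⟨by simp; omega, ?_⟩
      rw [h2, h1, h3, hb, hc]

theorem maxb_P0 (u : List Char) : u.take 0 = u.drop (u.length - 0) := by simp

theorem maxb_bord (u : List Char) : Bord u (maxb u) := by
  unfold Bord maxb
  refine ⟨le_trans (Nat.findGreatest_le _) (by omega), ?_⟩
  exact Nat.findGreatest_spec (P := fun j => u.take j = u.drop (u.length - j))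
    (Nat.zero_le _) (maxb_P0 u)

theorem maxb_le (u : List Char) : maxb u ≤ u.length - 1 := Nat.findGreatest_le _

theorem le_maxb {u : List Char} {j : Nat} (h : Bord u j) (hj : j ≤ u.length - 1) : j ≤ maxb u :=
  Nat.le_findGreatest hj h.2

theorem maxb_eq_of {u : List Char} {x : Nat} (hb : Bord u x) (hx : x ≤ u.length - 1)
    (hmax : ∀ j, Bord u j → j ≤ u.length - 1 → j ≤ x) : maxb u = x :=
  le_antisymm (hmax _ (maxb_bord u) (maxb_le u)) (le_maxb hb hx)

theorem take_succ_eq {w : List Char} {q : Nat} (h : q < w.length) :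
    w.take (q+1) = w.take q ++ [w.getD q ' '] := by
  rw [List.take_add_one, List.getElem?_eq_getElem h]
  simp [List.getD, List.getElem?_eq_getElem h]

theorem bord_succ_iff {w : List Char} {q e : Nat} (hq : q < w.length) (he : e < q) :
    Bord (w.take (q+1)) (e+1) ↔ Bord (w.take q) e ∧ w.getD e ' ' = w.getD q ' ' := by
  rw [take_succ_eq hq, bord_ext (by simp; omega)]
  have : (w.take q).getD e (w.getD q ' ') = w.getD e ' ' := by
    have he' : e < w.length := lt_trans he hq
    simp [List.getD, List.getElem?_eq_getElem, List.getElem?_take_of_lt he, List.getElem?_eq_getElem he']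
  rw [this]

theorem inner_spec {w : List Char} {piL : List Nat} {q : Nat} (hq : q < w.length)
    (hpi : ∀ t, t < q → piL.getD t 0 = maxb (w.take (t+1))) :
    ∀ k, ∀ fuel, k ≤ fuel → Bord (w.take q) k → k < q →
    (∀ e, e < q → Bord (w.take q) e → w.getD e ' ' = w.getD q ' ' → e ≤ k) →
    (Bord (w.take q) (pvKmpInner w piL (w.getD q ' ') fuel k) ∧
     pvKmpInner w piL (w.getD q ' ') fuel k < q ∧
     (∀ e, e < q → Bord (w.take q) e → w.getD e ' ' = w.getD q ' ' → e ≤ pvKmpInner w piL (w.getD q ' ') fuel k) ∧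
     (pvKmpInner w piL (w.getD q ' ') fuel k = 0 ∨
       w.getD (pvKmpInner w piL (w.getD q ' ') fuel k) ' ' = w.getD q ' ')) := by
  intro k
  induction k using Nat.strong_induction_on with
  | _ k IH =>
    intro fuel hfuel hb hkq hext
    match fuel with
    | 0 =>
      have hk0 : k = 0 := Nat.le_zero.mp hfuel
      subst hk0
      exact ⟨hb, hkq, hext, Or.inl rfl⟩
    | fuel'+1 =>
      by_cases hc : 0 < k ∧ ¬ (w.getD q ' ' = w.getD k ' ')
      · obtain ⟨hkpos, hcne⟩ := hc
        have hc : 0 < k ∧ ¬ (w.getD q ' ' = w.getD k ' ') := ⟨hkpos, hcne⟩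
        have hstep : pvKmpInner w piL (w.getD q ' ') (fuel'+1) k
            = pvKmpInner w piL (w.getD q ' ') fuel' (piL.getD (k-1) 0) := by
          simp only [pvKmpInner, if_pos hc]
        rw [hstep]
        have hk1 : k - 1 < q := by omega
        have hpik : piL.getD (k-1) 0 = maxb (w.take k) := by
          have hkk : k - 1 + 1 = k := by omega
          rw [hpi (k-1) hk1, hkk]
        have hlen : (w.take k).length = k := by simp; omega
        have hkq' : (w.take q).take k = w.take k := by rw [List.take_take]; congr 1; omega
        have hb' : Bord (w.take q) (piL.getD (k-1) 0) := by
          rw [hpik]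
          exact bord_trans hb (by rw [hkq']; exact maxb_bord _)
        have hle : piL.getD (k-1) 0 ≤ k - 1 := by
          rw [hpik]
          calc maxb (w.take k) ≤ (w.take k).length - 1 := maxb_le _
          _ = k - 1 := by rw [hlen]
        have hext' : ∀ e, e < q → Bord (w.take q) e → w.getD e ' ' = w.getD q ' ' →
            e ≤ piL.getD (k-1) 0 := by
          intro e heq heb hee
          have hek : e ≤ k := hext e heq heb hee
          have hne : e ≠ k := by
            intro h; subst h; exact hc.2 hee.symm
          have helt : e < k := lt_of_le_of_ne hek hne
          have : Bord (w.take k) e := by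
            rw [← hkq']
            exact bord_nest (le_of_lt helt) hb heb
          rw [hpik]
          exact le_maxb this (by rw [hlen]; omega)
        exact IH (piL.getD (k-1) 0) (by omega) fuel' (by omega) hb' (by omega) hext'
      · have hstep : pvKmpInner w piL (w.getD q ' ') (fuel'+1) k = k := by
          simp only [pvKmpInner, if_neg hc]
        rw [hstep]
        refine ⟨hb, hkq, hext, ?_⟩
        by_cases h0 : k = 0
        · exact Or.inl h0
        · right
          have := not_and_or.mp hc
          rcases this with h | h
          · omega
          · exact (not_not.mp h).symm

theorem maxb_step {w : List Char} {q r : Nat} (hq : q < w.length) (hq1 : 1 ≤ q)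
    (hrb : Bord (w.take q) r) (hr : r < q)
    (hmax : ∀ e, e < q → Bord (w.take q) e → w.getD e ' ' = w.getD q ' ' → e ≤ r)
    (hexit : r = 0 ∨ w.getD r ' ' = w.getD q ' ') :
    maxb (w.take (q+1)) = (if w.getD q ' ' = w.getD r ' ' then r + 1 else r) := by
  have hlen : (w.take (q+1)).length = q + 1 := by simp; omega
  by_cases hcc : w.getD q ' ' = w.getD r ' '
  · rw [if_pos hcc]
    apply maxb_eq_of
    · exact (bord_succ_iff hq hr).mpr ⟨hrb, hcc.symm⟩
    · omega
    · intro j hjb hjle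
      rw [hlen] at hjle
      match j with
      | 0 => omega
      | e+1 =>
        have he : e < q := by omega
        have := (bord_succ_iff hq he).mp hjb
        have := hmax e he this.1 this.2
        omega
  · rw [if_neg hcc]
    have hr0 : r = 0 := by
      rcases hexit with h | h
      · exact h
      · exact absurd h.symm hcc
    subst hr0
    apply maxb_eq_of (bord_zero _)
    · omega
    · intro j hjb hjle
      rw [hlen] at hjle
      match j with
      | 0 => omega
      | e+1 =>
        have he : e < q := by omega
        have h2 := (bord_succ_iff hq he).mp hjb
        have he0 : e = 0 := by have := hmax e he h2.1 h2.2; omega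
        subst he0
        exact absurd h2.2.symm hcc

theorem kmpPis_spec (w : List Char) : ∀ m, m ≤ w.length - 1 →
    (List.range m).foldl (fun st t =>
      let q := t + 1
      let c := w.getD q ' '
      let k := pvKmpInner w st.1 c st.2 st.2
      let k := if c = w.getD k ' ' then k + 1 else k
      (st.1 ++ [k], k)) ([0], 0)
    = ((List.range (m+1)).map (fun q => maxb (w.take (q+1))), maxb (w.take (m+1))) := by
  intro m
  induction m with
  | zero =>
    intro _
    have h1 : maxb (w.take 1) = 0 := by
      apply maxb_eq_of (bord_zero _)
      · omega
      · intro j _ hj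
        have : (w.take 1).length ≤ 1 := by simp
        omega
    simp [List.range_one, h1]
  | succ m IH =>
    intro hm
    have hm' : m ≤ w.length - 1 := by omega
    have hq : m + 1 < w.length := by omega
    rw [List.range_succ, List.foldl_append, IH hm']
    simp only [List.foldl_cons, List.foldl_nil]
    have hpi : ∀ t, t < m + 1 →
        ((List.range (m+1)).map (fun q => maxb (w.take (q+1)))).getD t 0 = maxb (w.take (t+1)) := by
      intro t ht
      have htl : t < ((List.range (m+1)).map fun q => maxb (w.take (q+1))).length := by
        simpa using ht
      rw [List.getD_eq_getElem _ _ htl]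
      simp
    have hlen : (w.take (m+1)).length = m + 1 := by simp; omega
    have hinner := inner_spec hq hpi (maxb (w.take (m+1))) (maxb (w.take (m+1))) (le_refl _)
      (maxb_bord _) (by have := maxb_le (w.take (m+1)); omega)
      (fun e he heb hee => le_maxb heb (by omega))
    obtain ⟨hb, hlt, hext, hexit⟩ := hinner
    have hstep := maxb_step hq (by omega) hb hlt hext (by
      rcases hexit with h | h
      · exact Or.inl h
      · exact Or.inr h)
    rw [List.range_succ (n := m+1), List.map_append]
    simp only [Prod.mk.injEq]
    refine ⟨?_, ?_⟩ <;> simp [hstep]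

theorem chain_spec {w : List Char} {piL : List Nat}
    (hpi : ∀ t, t < w.length → piL.getD t 0 = maxb (w.take (t+1))) :
    ∀ j, ∀ fuel, j ≤ fuel → Bord w j → j ≤ w.length - 1 →
    (List.Pairwise (fun a b => b < a) (pvChain piL fuel j) ∧
     ∀ x, x ∈ pvChain piL fuel j ↔ (1 ≤ x ∧ x ≤ j ∧ Bord w x)) := by
  intro j
  induction j using Nat.strong_induction_on with
  | _ j IH =>
    intro fuel hfuel hb hj
    match fuel with
    | 0 =>
      have : j = 0 := by omega
      subst this
      refine ⟨List.Pairwise.nil, fun x => ?_⟩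
      simp only [pvChain, List.not_mem_nil, false_iff]
      omega
    | fuel'+1 =>
      by_cases h0 : 0 < j
      · have hstep : pvChain piL (fuel'+1) j = j :: pvChain piL fuel' (piL.getD (j-1) 0) := by
          simp only [pvChain, if_pos h0]
        have hj1 : j - 1 < w.length := by omega
        have hjj : j - 1 + 1 = j := by omega
        have hpj : piL.getD (j-1) 0 = maxb (w.take j) := by rw [hpi (j-1) hj1, hjj]
        have hwlen : (w.take j).length = j := by simp; omega
        have htq : w.take w.length = w := by simp
        have hble : piL.getD (j-1) 0 ≤ j - 1 := by
          rw [hpj]; have := maxb_le (w.take j); omega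
        have hb' : Bord w (piL.getD (j-1) 0) := by
          rw [hpj]
          exact bord_trans hb (maxb_bord _)
        obtain ⟨hpw, hmem⟩ := IH (piL.getD (j-1) 0) (by omega) fuel' (by omega) hb' (by omega)
        rw [hstep]
        constructor
        · exact List.Pairwise.cons (fun x hx => by have := (hmem x).mp hx; omega) hpw
        · intro x
          simp only [List.mem_cons, hmem]
          constructor
          · rintro (rfl | ⟨h1, h2, h3⟩)
            · exact ⟨by omega, le_refl _, hb⟩
            · exact ⟨h1, by omega, h3⟩
          · rintro ⟨h1, h2, h3⟩
            rcases eq_or_lt_of_le h2 with rfl | hlt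
            · exact Or.inl rfl
            · right
              refine ⟨h1, ?_, h3⟩
              rw [hpj]
              have : Bord (w.take j) x := bord_nest (by omega) hb h3
              exact le_maxb this (by omega)
      · have : j = 0 := by omega
        subst this
        refine ⟨by simp [pvChain], fun x => ?_⟩
        simp only [pvChain, if_neg h0, List.not_mem_nil, false_iff]
        omega

theorem sep_take {p s : List Char} {j : Nat} (h : j ≤ p.length) :
    (p ++ '\x00' :: s).take j = p.take j :=
  List.take_append_of_le_length h

theorem sep_drop {p s : List Char} {j : Nat} (h : j ≤ s.length) :
    (p ++ '\x00' :: s).drop ((p ++ '\x00' :: s).length - j) = s.drop (s.length - j) := by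
  have hlen : (p ++ '\x00' :: s).length = p.length + 1 + s.length := by simp; omega
  rw [hlen]
  have h1 : p.length + 1 + s.length - j = p.length + (1 + (s.length - j)) := by omega
  rw [h1, List.drop_append, List.drop_eq_nil_of_le (le_of_eq rfl |>.trans (by omega))]
  have h2 : p.length + (1 + (s.length - j)) - p.length = s.length - j + 1 := by omega
  rw [h2, List.drop_succ_cons]
  simp

theorem idxOf_sep {l1 l2 : List Char} (h : '\x00' ∉ l1) :
    (l1 ++ '\x00' :: l2).idxOf '\x00' = l1.length := by
  rw [List.idxOf_append, if_neg h, List.idxOf_cons_self]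
  simp

theorem take_big {p s : List Char} {j : Nat} (h : p.length < j) :
    (p ++ '\x00' :: s).take j = p ++ '\x00' :: s.take (j - p.length - 1) := by
  rw [List.take_append, List.take_of_length_le (by omega)]
  congr 1
  have h2 : j - p.length = (j - p.length - 1) + 1 := by omega
  rw [h2, List.take_succ_cons]
  simp

theorem drop_big {p s : List Char} {j : Nat} (hj : j ≤ p.length + s.length)
    (h : s.length < j) :
    (p ++ '\x00' :: s).drop ((p ++ '\x00' :: s).length - j) = p.drop (p.length + 1 + s.length - j) ++ '\x00' :: s := by
  have hlen : (p ++ '\x00' :: s).length = p.length + 1 + s.length := by simp; omega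
  rw [hlen, List.drop_append]
  have h2 : p.length + 1 + s.length - j - p.length = 0 := by omega
  rw [h2, List.drop_zero]

theorem bord_sep {p s : List Char} (hp : '\x00' ∉ p) (hs : '\x00' ∉ s) {j : Nat}
    (h1 : 1 ≤ j) (hn : j ≤ p.length + s.length) :
    Bord (p ++ '\x00' :: s) j ↔
      (j ≤ p.length ∧ j ≤ s.length ∧ p.take j = s.drop (s.length - j)) := by
  have hlen : (p ++ '\x00' :: s).length = p.length + 1 + s.length := by simp; omega
  constructor
  · rintro ⟨hjw, he⟩
    have hjp : j ≤ p.length := by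
      by_contra hgt
      push_neg at hgt
      have hmem : '\x00' ∈ (p ++ '\x00' :: s).take j := by
        rw [take_big hgt]
        simp
      by_cases hjs : j ≤ s.length
      · rw [he, sep_drop hjs] at hmem
        exact hs (List.mem_of_mem_drop hmem)
      · push_neg at hjs
        have hidx := congrArg (List.idxOf '\x00') he
        rw [take_big hgt, drop_big hn hjs, idxOf_sep hp,
            idxOf_sep (fun hm => hp (List.mem_of_mem_drop hm))] at hidx
        have : (p.drop (p.length + 1 + s.length - j)).length = p.length - (p.length + 1 + s.length - j) := by
          simp
        omega
    have hjs : j ≤ s.length := by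
      by_contra hgt
      push_neg at hgt
      have hmem : '\x00' ∈ (p ++ '\x00' :: s).drop ((p ++ '\x00' :: s).length - j) := by
        rw [drop_big hn hgt]
        simp
      rw [← he, sep_take hjp] at hmem
      exact hp (List.mem_of_mem_take hmem)
    rw [sep_take hjp, sep_drop hjs] at he
    exact ⟨hjp, hjs, he⟩
  · rintro ⟨hjp, hjs, he⟩
    refine ⟨by omega, ?_⟩
    rw [sep_take hjp, sep_drop hjs]
    exact he

theorem sorted_mem_ext : ∀ (l1 l2 : List Nat), l1.Pairwise (· < ·) → l2.Pairwise (· < ·) →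
    (∀ x, x ∈ l1 ↔ x ∈ l2) → l1 = l2 := by
  intro l1
  induction l1 with
  | nil =>
    intro l2 _ _ h
    cases l2 with
    | nil => rfl
    | cons b t => exact absurd ((h b).mpr (by simp)) (by simp)
  | cons a t ih =>
    intro l2 h1 h2 hm
    cases l2 with
    | nil => exact absurd ((hm a).mp (by simp)) (by simp)
    | cons b t2 =>
      have hab : a = b := by
        have ha := (hm a).mp (List.mem_cons_self ..)
        have hb := (hm b).mpr (List.mem_cons_self ..)
        rcases List.mem_cons.mp ha with h | h
        · exact h
        · rcases List.mem_cons.mp hb with h' | h'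
          · exact h'.symm
          · have := (List.pairwise_cons.mp h2).1 a h
            have := (List.pairwise_cons.mp h1).1 b h'
            omega
      subst hab
      congr 1
      apply ih t2 (List.pairwise_cons.mp h1).2 (List.pairwise_cons.mp h2).2
      intro x
      constructor
      · intro hx
        have hax := (List.pairwise_cons.mp h1).1 x hx
        rcases List.mem_cons.mp ((hm x).mp (List.mem_cons_of_mem _ hx)) with h | h
        · omega
        · exact h
      · intro hx
        have hax := (List.pairwise_cons.mp h2).1 x hx
        rcases List.mem_cons.mp ((hm x).mpr (List.mem_cons_of_mem _ hx)) with h | h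
        · omega
        · exact h

theorem overlaps_eq {p s : List Char} (hp : '\x00' ∉ p) (hs : '\x00' ∉ s) :
    pvOverlaps p s = (List.range' 1 (min p.length s.length)).filter
      (fun i => decide (p.take i = s.drop (s.length - i))) := by
  have hw : (p ++ '\x00' :: s).length = p.length + 1 + s.length := by simp; omega
  have hw1 : 1 ≤ (p ++ '\x00' :: s).length := by omega
  have hpis := kmpPis_spec (p ++ '\x00' :: s) ((p ++ '\x00' :: s).length - 1) (le_refl _)
  have hm1 : (p ++ '\x00' :: s).length - 1 + 1 = (p ++ '\x00' :: s).length := by omega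
  rw [hm1] at hpis
  have hpi : ∀ t, t < (p ++ '\x00' :: s).length →
      ((List.range (p ++ '\x00' :: s).length).map
        (fun q => maxb ((p ++ '\x00' :: s).take (q+1)))).getD t 0
      = maxb ((p ++ '\x00' :: s).take (t+1)) := by
    intro t ht
    have htl : t < ((List.range (p ++ '\x00' :: s).length).map
        (fun q => maxb ((p ++ '\x00' :: s).take (q+1)))).length := by simpa using ht
    rw [List.getD_eq_getElem _ _ htl]
    simp
  have htk : (p ++ '\x00' :: s).take ((p ++ '\x00' :: s).length) = p ++ '\x00' :: s := by simp
  have hj0 : ((List.range (p ++ '\x00' :: s).length).map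
      (fun q => maxb ((p ++ '\x00' :: s).take (q+1)))).getD ((p ++ '\x00' :: s).length - 1) 0
      = maxb (p ++ '\x00' :: s) := by
    rw [hpi _ (by omega), hm1, htk]
  have hch := chain_spec hpi (maxb (p ++ '\x00' :: s)) ((p ++ '\x00' :: s).length)
    (by have := maxb_le (p ++ '\x00' :: s); omega) (maxb_bord _) (maxb_le _)
  obtain ⟨hpw, hmem⟩ := hch
  have hpis' : pvKmpPis (p ++ '\x00' :: s) =
      ((List.range (p ++ '\x00' :: s).length).map
        (fun q => maxb ((p ++ '\x00' :: s).take (q+1))), maxb ((p ++ '\x00' :: s).take (p ++ '\x00' :: s).length)) := by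
    unfold pvKmpPis
    exact hpis
  have hov : pvOverlaps p s = (pvChain ((List.range (p ++ '\x00' :: s).length).map
      (fun q => maxb ((p ++ '\x00' :: s).take (q+1)))) ((p ++ '\x00' :: s).length)
      (maxb (p ++ '\x00' :: s))).reverse := by
    unfold pvOverlaps
    simp only [hpis', hj0]
  rw [hov]
  apply sorted_mem_ext
  · rw [List.pairwise_reverse]
    exact hpw
  · exact (List.pairwise_lt_range' 1).filter _
  · intro x
    rw [List.mem_reverse, hmem x, List.mem_filter, List.mem_range'_1]
    constructor
    · rintro ⟨hx1, hxm, hxb⟩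
      have hxle : x ≤ p.length + s.length := by
        have := maxb_le (p ++ '\x00' :: s)
        omega
      obtain ⟨hxp, hxs, heq⟩ := (bord_sep hp hs hx1 hxle).mp hxb
      exact ⟨⟨hx1, by omega⟩, by simpa using heq⟩
    · rintro ⟨⟨hx1, hxlt⟩, hcond⟩
      have hxp : x ≤ p.length := by omega
      have hxs : x ≤ s.length := by omega
      have heq : p.take x = s.drop (s.length - x) := by simpa using hcond
      have hxb : Bord (p ++ '\x00' :: s) x := (bord_sep hp hs hx1 (by omega)).mpr ⟨hxp, hxs, heq⟩
      refine ⟨hx1, ?_, hxb⟩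
      exact le_maxb hxb (by omega)

theorem pvMerge_left {s1 s2 : String} {a : Nat} (l1 l2 : List Nat)
    (h : ∀ x ∈ l2, a ≤ x) :
    pvMerge s1 s2 (a :: l1) l2
      = PySem.Str.slice s1 none (some (a : Int)) :: pvMerge s1 s2 l1 l2 := by
  cases l2 with
  | nil => cases l1 <;> simp [pvMerge]
  | cons j t => rw [pvMerge, if_pos (h j (by simp))]

theorem pvMerge_right {s1 s2 : String} {a : Nat} (l1 l2 : List Nat)
    (h : ∀ x ∈ l1, ¬ x ≤ a) :
    pvMerge s1 s2 l1 (a :: l2)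
      = PySem.Str.slice s2 none (some (a : Int)) :: pvMerge s1 s2 l1 l2 := by
  cases l1 with
  | nil => simp [pvMerge]
  | cons i t => rw [pvMerge, if_neg (h i (by simp))]

theorem merge_eq (s1 s2 : String) : ∀ (m a : Nat) (P Q : Nat → Bool),
    pvMerge s1 s2 ((List.range' a m).filter P) ((List.range' a m).filter Q)
    = (List.range' a m).flatMap (fun i =>
        (if P i then [PySem.Str.slice s1 none (some (i : Int))] else [])
        ++ (if Q i then [PySem.Str.slice s2 none (some (i : Int))] else [])) := by
  intro m
  induction m with
  | zero => intro a P Q; simp [pvMerge]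
  | succ m IH =>
    intro a P Q
    have hr : List.range' a (m+1) = a :: List.range' (a+1) m := by
      rw [List.range'_succ]
    rw [hr]
    have hmem1 : ∀ x ∈ (List.range' (a+1) m).filter P, a < x := by
      intro x hx
      have := List.mem_range'_1.mp (List.mem_of_mem_filter hx)
      omega
    have hmem2 : ∀ x ∈ (List.range' (a+1) m).filter Q, a < x := by
      intro x hx
      have := List.mem_range'_1.mp (List.mem_of_mem_filter hx)
      omega
    by_cases hP : P a <;> by_cases hQ : Q a <;>
      simp only [List.filter_cons, hP, hQ, List.flatMap_cons, if_true, if_false,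
        Bool.false_eq_true, ite_true, ite_false, IH]
    · have hL : ∀ x ∈ a :: (List.range' (a+1) m).filter Q, a ≤ x := by
        intro x hx
        rcases List.mem_cons.mp hx with rfl | h
        · exact le_refl _
        · exact le_of_lt (hmem2 x h)
      have hR : ∀ x ∈ (List.range' (a+1) m).filter P, ¬ x ≤ a := by
        intro x hx
        exact not_le_of_gt (hmem1 x hx)
      rw [pvMerge_left _ _ hL, pvMerge_right _ _ hR, IH]
      simp
    · rw [pvMerge_left _ _ (by intro x hx; exact le_of_lt (hmem2 x hx)), IH]
      simp
    · rw [pvMerge_right _ _ (by intro x hx; exact not_le_of_gt (hmem1 x hx)), IH]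
      simp
    · simp

theorem cond_eq (t1 t2 : String) (x : Nat) (hx : 0 < x) :
    (PySem.Str.slice t1 none (some (x : Int)) == PySem.Str.slice t2 (some (-(x : Int))) none)
    = decide (t1.toList.take x = t2.toList.drop (t2.toList.length - x)) := by
  rw [Bool.eq_iff_iff]
  simp only [beq_iff_eq, decide_eq_true_eq, ← String.toList_inj, PySem.Str.toList_slice,
    PySem.Chars.slice_eq_listSlice, PySem.List.slice_to_natCast,
    PySem.List.slice_from_neg_natCast _ x hx]

theorem A_eq (s1 s2 : String) :
    GetCommonString s1 s2 = (List.range' 1 (min s1.toList.length s2.toList.length)).flatMap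
      (fun x => (if s1.toList.take x = s2.toList.drop (s2.toList.length - x)
                  then [PySem.Str.slice s1 none (some (x : Int))] else [])
        ++ (if s2.toList.take x = s1.toList.drop (s1.toList.length - x)
                  then [PySem.Str.slice s2 none (some (x : Int))] else [])) := by
  simp only [GetCommonString, PySem.Str.len_eq]
  have hshort : (if (s1.toList.length : Int) < (s2.toList.length : Int)
      then (s1.toList.length : Int) else (s2.toList.length : Int))
      = ((min s1.toList.length s2.toList.length : Nat) : Int) := by
    split_ifs with h <;> omega
  rw [hshort]
  have hrange : PySem.List.pyRange 1 (((min s1.toList.length s2.toList.length : Nat) : Int) + 1)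
      = (List.range' 1 (min s1.toList.length s2.toList.length)).map (fun n : Nat => (n : Int)) := by
    rw [PySem.List.pyRange_one, List.range'_eq_map_range, List.map_map]
    have h1 : (((min s1.toList.length s2.toList.length : Nat) : Int) + 1 - 1).toNat
        = min s1.toList.length s2.toList.length := by omega
    rw [h1]
    apply List.map_congr_left
    intro k _
    simp
  rw [hrange, List.foldl_map]
  rw [PySem.List.foldl_congr_mem _ _
    (fun acc x => acc ++
      ((if s1.toList.take x = s2.toList.drop (s2.toList.length - x)
            then [PySem.Str.slice s1 none (some (x : Int))] else [])
        ++ (if s2.toList.take x = s1.toList.drop (s1.toList.length - x)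
            then [PySem.Str.slice s2 none (some (x : Int))] else []))) _ ?_]
  · rw [PySem.List.foldl_append_eq_flatMap]
    simp
  · intro acc x hx
    have hx1 : 0 < x := by
      have := List.mem_range'_1.mp hx
      omega
    simp only [cond_eq s1 s2 x hx1, cond_eq s2 s1 x hx1, decide_eq_true_eq]
    split_ifs <;> simp

theorem no_nul {s : String} (h : pvDomStr s = true) : '\x00' ∉ s.toList := by
  intro hm
  have h2 := (List.all_eq_true.mp h) _ hm
  exact absurd h2 (by decide)

theorem main_eq (s1 s2 : String) (hp : '\x00' ∉ s1.toList) (hs : '\x00' ∉ s2.toList) :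
    GetCommonString s1 s2 = GetCommonString_alt s1 s2 := by
  rw [A_eq]
  simp only [GetCommonString_alt]
  rw [overlaps_eq hp hs, overlaps_eq hs hp,
      Nat.min_comm s2.toList.length s1.toList.length, merge_eq]
  simp only [decide_eq_true_eq]


-- ===== VERDICT (by name: the statement is the Claim_ definition above) =====
theorem GetCommonString_spec : Claim_equal_GetCommonString := by
  intro s1 s2 hdom
  unfold Spec_GetCommonString
  unfold Dom_GetCommonString at hdom
  obtain ⟨h1, h2⟩ := Bool.and_eq_true_iff.mp hdom
  exact main_eq s1 s2 (no_nul h1) (no_nul h2)
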